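-- pv_equiv track=rewrite | github.com/AleFEMac/PDDLParser | src/action_utils.py | pick_max_matches
-- ===== SOURCE A (Python) =====
-- def pick_max_matches(inters):
--
--     threshold = 0
--     out = []
--
--     for i in inters:
--         if len(i) == threshold:
--             out.append(i)
--         elif len(i) > threshold:
--             threshold = len(i)
--             out = [i]
--     return out
-- ===== SOURCE B (Python) =====
-- def pick_max_matches(inters):
--     m = max((len(i) for i in inters), default=0)
--     return [i for i in inters if len(i) == m]
-- ===== Notes on version B (the rewrite author's own statement) =====
-- stated objective: simpler
-- what changed: Replaced the single running-maximum-with-reset loop by a max-then-filter decomposition: compute the maximum length (default 0), then keep the items of that length.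
import Mathlib
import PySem

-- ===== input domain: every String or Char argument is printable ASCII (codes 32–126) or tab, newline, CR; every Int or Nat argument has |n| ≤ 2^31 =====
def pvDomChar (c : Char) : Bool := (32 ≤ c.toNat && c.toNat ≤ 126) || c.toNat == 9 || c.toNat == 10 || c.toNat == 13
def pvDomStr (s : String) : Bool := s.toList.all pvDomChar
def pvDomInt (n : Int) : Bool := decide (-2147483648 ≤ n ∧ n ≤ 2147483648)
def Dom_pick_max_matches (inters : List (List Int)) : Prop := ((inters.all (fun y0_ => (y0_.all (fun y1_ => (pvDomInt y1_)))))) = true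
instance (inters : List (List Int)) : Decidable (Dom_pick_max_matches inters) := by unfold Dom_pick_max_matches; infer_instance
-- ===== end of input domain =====

-- B replaces A's running-maximum-with-reset loop by a max-then-filter decomposition (simpler; same cost).

-- ===== PORT A =====
-- A's loop: state (threshold, out); append on equal length, reset on greater, skip otherwise.
def pick_max_matches (inters : List (List Int)) : List (List Int) :=
  (inters.foldl (fun (st : Int × List (List Int)) i =>
    if (i.length : Int) = st.1 then (st.1, st.2 ++ [i])
    else if (i.length : Int) > st.1 then ((i.length : Int), [i])
    else st) ((0 : Int), ([] : List (List Int)))).2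

-- ===== PORT B =====
-- B: m = max(len(i) for i in inters, default=0); then filter the items of length m.
def pick_max_matches_alt (inters : List (List Int)) : List (List Int) :=
  let m : Int := inters.foldl (fun a i => max a (i.length : Int)) 0
  inters.filter (fun i => (i.length : Int) = m)

-- ===== PRECONDITION & SPEC =====
def Spec_pick_max_matches (inters : List (List Int)) (out : List (List Int)) : Prop := out = pick_max_matches_alt inters
instance (inters : List (List Int)) (out : List (List Int)) : Decidable (Spec_pick_max_matches inters out) := by unfold Spec_pick_max_matches; infer_instance

-- ===== CLAIM (what is proved, stated in full; the proofs are below) =====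
def Claim_equal_pick_max_matches : Prop := ∀ (inters : List (List Int)), Dom_pick_max_matches inters → Spec_pick_max_matches inters (pick_max_matches inters)

-- ===== LEMMAS AND PROOFS =====

theorem pv_maxfold_le (l : List (List Int)) (t : Int) :
    t ≤ l.foldl (fun a i => max a (i.length : Int)) t := by
  induction l generalizing t with
  | nil => simp
  | cons i l ih => exact le_trans (le_max_left _ _) (ih _)

theorem pv_loopA_char (l : List (List Int)) (t : Int) (acc : List (List Int)) :
    l.foldl (fun (st : Int × List (List Int)) i =>
      if (i.length : Int) = st.1 then (st.1, st.2 ++ [i])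
      else if (i.length : Int) > st.1 then ((i.length : Int), [i])
      else st) (t, acc)
    = (l.foldl (fun a i => max a (i.length : Int)) t,
       if l.foldl (fun a i => max a (i.length : Int)) t = t
       then acc ++ l.filter (fun i => (i.length : Int) = t)
       else l.filter (fun i => (i.length : Int) = l.foldl (fun a i => max a (i.length : Int)) t)) := by
  induction l generalizing t acc with
  | nil => simp
  | cons i l ih =>
    by_cases h1 : (i.length : Int) = t
    · have hmax : max t (i.length : Int) = t := by omega
      simp only [List.foldl_cons, if_pos h1, hmax]
      rw [ih]
      by_cases h2 : l.foldl (fun a i => max a (i.length : Int)) t = t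
      · simp [h2, List.filter_cons, h1]
      · have hne : (i.length : Int) ≠ l.foldl (fun a i => max a (i.length : Int)) t := by
          have := pv_maxfold_le l t; omega
        simp [h2, List.filter_cons, hne]
    · by_cases h2 : (i.length : Int) > t
      · have hmax : max t (i.length : Int) = (i.length : Int) := by omega
        simp only [List.foldl_cons, if_neg h1, if_pos h2, hmax]
        rw [ih]
        have hge := pv_maxfold_le l (i.length : Int)
        by_cases h3 : l.foldl (fun a i => max a (i.length : Int)) (i.length : Int) = (i.length : Int)
        · have hne : l.foldl (fun a i => max a (i.length : Int)) (i.length : Int) ≠ t := by omega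
          simp [h3, hne, h1, List.filter_cons]
        · have hne : l.foldl (fun a i => max a (i.length : Int)) (i.length : Int) ≠ t := by omega
          have hne2 : ¬ ((i.length : Int) = l.foldl (fun a i => max a (i.length : Int)) (i.length : Int)) := fun h => h3 h.symm
          simp [h3, hne, List.filter_cons, hne2]
      · have hlt : (i.length : Int) < t := by omega
        have hmax : max t (i.length : Int) = t := by omega
        simp only [List.foldl_cons, if_neg h1, if_neg h2, hmax]
        rw [ih]
        have hge := pv_maxfold_le l t
        by_cases h3 : l.foldl (fun a i => max a (i.length : Int)) t = t
        · simp [h3, List.filter_cons, h1]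
        · have hne : ¬ ((i.length : Int) = l.foldl (fun a i => max a (i.length : Int)) t) := by omega
          simp [h3, List.filter_cons, hne]

-- ===== VERDICT (by name: the statement is the Claim_ definition above) =====
theorem pick_max_matches_spec : Claim_equal_pick_max_matches := by
  intro inters _
  unfold Spec_pick_max_matches pick_max_matches pick_max_matches_alt
  rw [pv_loopA_char]
  by_cases h : inters.foldl (fun a i => max a (i.length : Int)) 0 = 0
  · simp [h]
  · simp [h]
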